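-- pv_equiv track=rewrite | github.com/mbalzert1978/day1_python | day1/main.py | gather_valid
-- ===== SOURCE A (Python) =====
-- def gather_valid(data: tuple[str, ...]) -> tuple[str, ...]:
--     valid = {
--         "one": "1",
--         "two": "2",
--         "three": "3",
--         "four": "4",
--         "five": "5",
--         "six": "6",
--         "seven": "7",
--         "eight": "8",
--         "nine": "9",
--     }
--     new_data = []
--     buffer = ""
--     for item in data:
--         srg = ""
--         for letter in item:
--             buffer += letter
--             if buffer in valid:
--                 srg += valid[buffer]
--                 buffer = ""
--                 continue
--             if letter.isdigit():
--                 srg += letter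
--                 buffer = ""
--         new_data.append(srg)
--         buffer = ""
--     return tuple(new_data)
-- ===== SOURCE B (Python) =====
-- # Staged algorithm: split each item on digit characters, then convert each
-- # digit-free segment by greedy shortest-word-prefix matching (startswith on
-- # the nine spelled words, which are mutually prefix-free); a segment position
-- # with no word prefix can never match again, so the rest is dropped.
-- _WORDS = [
--     ("one", "1"), ("two", "2"), ("three", "3"), ("four", "4"), ("five", "5"),
--     ("six", "6"), ("seven", "7"), ("eight", "8"), ("nine", "9"),
-- ]
--
-- def _run(seg):
--     out = []
--     while True:
--         for w, d in _WORDS: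
--             if seg.startswith(w):
--                 out.append(d)
--                 seg = seg[len(w):]
--                 break
--         else:
--             return "".join(out)
--
-- def _convert(item):
--     out = []
--     seg = []
--     for ch in item:
--         if ch.isdigit():
--             out.append(_run("".join(seg)))
--             out.append(ch)
--             seg = []
--         else:
--             seg.append(ch)
--     out.append(_run("".join(seg)))
--     return "".join(out)
--
-- def gather_valid(data):
--     return tuple(_convert(item) for item in data)
-- ===== Notes on version B (the rewrite author's own statement) =====
-- stated objective: alternative
-- what changed: B replaces A's per-character growing-buffer dict-membership scan by a staged algorithm: each item is split on digit characters and every digit-free segment is converted by greedy word-prefix matching (startswith against the nine mutually prefix-free spelled words), dropping the rest of a segment once no word is a prefix.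
import Mathlib
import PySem

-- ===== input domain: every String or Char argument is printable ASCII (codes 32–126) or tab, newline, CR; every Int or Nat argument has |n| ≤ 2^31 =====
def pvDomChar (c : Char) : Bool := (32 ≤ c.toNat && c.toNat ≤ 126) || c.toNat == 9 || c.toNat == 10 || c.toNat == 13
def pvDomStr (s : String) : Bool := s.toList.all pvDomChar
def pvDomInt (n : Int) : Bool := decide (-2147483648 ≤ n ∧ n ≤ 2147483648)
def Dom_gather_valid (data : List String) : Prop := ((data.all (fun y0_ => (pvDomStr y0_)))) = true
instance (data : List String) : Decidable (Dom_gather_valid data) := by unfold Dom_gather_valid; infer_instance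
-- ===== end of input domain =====

-- B replaces A's per-character buffer/dict-membership scan by a staged algorithm:
-- split each item on digit characters, then convert each digit-free segment by
-- greedy word-prefix matching against the nine spelled words (dropping the rest
-- of a segment once no word is a prefix); same return value.

-- ===== PORT A =====
-- A's dict lookup `valid[buffer]` / membership `buffer in valid`, keys as List Char
def wordDigit? (b : List Char) : Option Char :=
  if b = "one".toList then some '1'
  else if b = "two".toList then some '2'
  else if b = "three".toList then some '3'
  else if b = "four".toList then some '4'
  else if b = "five".toList then some '5'
  else if b = "six".toList then some '6'
  else if b = "seven".toList then some '7'
  else if b = "eight".toList then some '8'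
  else if b = "nine".toList then some '9'
  else none

-- inner-loop body of A: state = (srg, buffer)
def stepA (st : List Char × List Char) (letter : Char) : List Char × List Char :=
  let buffer := st.2 ++ [letter]
  match wordDigit? buffer with
  | some d => (st.1 ++ [d], [])
  | none =>
    if PySem.Chars.isdigit letter then (st.1 ++ [letter], [])
    else (st.1, buffer)

def gather_valid (data : List String) : List String :=
  (data.foldl
    (fun (acc : List String × List Char) item =>
      let r := item.toList.foldl stepA ([], acc.2)
      (acc.1 ++ [String.ofList r.1], []))
    ([], [])).1

-- ===== PORT B =====
-- B's `_WORDS` table of (spelled word, digit) pairs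
def words : List (List Char × Char) :=
  [("one".toList, '1'), ("two".toList, '2'), ("three".toList, '3'),
   ("four".toList, '4'), ("five".toList, '5'), ("six".toList, '6'),
   ("seven".toList, '7'), ("eight".toList, '8'), ("nine".toList, '9')]

-- cited by runGo's termination proof: every word is nonempty
lemma words_min_len : ∀ p ∈ words, 0 < p.1.length := by decide

-- B's `_run`: greedy word-prefix matching (startswith) on a digit-free segment
def runGo (seg : List Char) : List Char :=
  match h : words.find? (fun p => p.1.isPrefixOf seg) with
  | some p => p.2 :: runGo (seg.drop p.1.length)
  | none => []
termination_by seg.length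
decreasing_by
  have hp := List.find?_some h
  have hm := List.mem_of_find?_eq_some h
  have h1 := words_min_len p hm
  have h2 : p.1.length ≤ seg.length :=
    (List.isPrefixOf_iff_prefix.mp (by simpa using hp)).length_le
  simp only [List.length_drop]; omega

-- B's `_convert` loop: accumulate the pending digit-free segment, flush it
-- (converted) at each digit character and at the end of the item
def splitGo : List Char → List Char → List Char
  | [], seg => runGo seg
  | c :: cs, seg =>
      if PySem.Chars.isdigit c then runGo seg ++ c :: splitGo cs []
      else splitGo cs (seg ++ [c])

def convertAlt (item : String) : String :=
  String.ofList (splitGo item.toList [])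

def gather_valid_alt (data : List String) : List String :=
  data.map convertAlt

-- ===== PRECONDITION & SPEC =====
def Spec_gather_valid (data : List String) (out : List String) : Prop := out = gather_valid_alt data
instance (data : List String) (out : List String) : Decidable (Spec_gather_valid data out) := by unfold Spec_gather_valid; infer_instance

-- ===== CLAIM (what is proved, stated in full; the proofs are below) =====
def Claim_equal_gather_valid : Prop := ∀ (data : List String), Dom_gather_valid data → Spec_gather_valid data (gather_valid data)

-- ===== LEMMAS AND PROOFS =====

-- proof-side abstraction of A's inner loop restricted to digit-free input:
-- the characters emitted from buffer b over the remaining segment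
def emit : List Char → List Char → List Char
  | _, [] => []
  | b, c :: cs =>
    match wordDigit? (b ++ [c]) with
    | some d => d :: emit [] cs
    | none => emit (b ++ [c]) cs

-- no word ends in a digit character
lemma wordDigit?_none_of_digit {b : List Char} {c : Char}
    (h : PySem.Chars.isdigit c = true) : wordDigit? (b ++ [c]) = none := by
  unfold wordDigit?
  split_ifs with h1 h2 h3 h4 h5 h6 h7 h8 h9 <;> try rfl
  all_goals
    exact absurd h (by
      have hl := congrArg List.getLast? ‹b ++ [c] = _›
      simp at hl
      subst hl; decide)

-- the table and the lookup agree on the words …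
lemma words_lookup : ∀ p ∈ words, wordDigit? p.1 = some p.2 := by decide

-- … and on proper prefixes of words (none is a word)
lemma words_proper : ∀ p ∈ words, ∀ j < p.1.length, 0 < j →
    wordDigit? (p.1.take j) = none := by decide

-- any successful lookup comes from the table
lemma wordDigit?_mem {x : List Char} {d : Char} (h : wordDigit? x = some d) :
    (x, d) ∈ words := by
  unfold wordDigit? at h
  split_ifs at h with h1 h2 h3 h4 h5 h6 h7 h8 h9 <;>
    (injection h with h'; subst_vars; decide)

-- A's inner fold over digit-free characters emits `emit b cs` after srg
lemma foldA_emit (cs : List Char) : ∀ (b srg : List Char),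
    (∀ c ∈ cs, PySem.Chars.isdigit c = false) →
    (cs.foldl stepA (srg, b)).1 = srg ++ emit b cs := by
  induction cs with
  | nil => intro b srg _; simp [emit]
  | cons c cs ih =>
    intro b srg hnd
    have hc : PySem.Chars.isdigit c = false := hnd c (by simp)
    have hcs : ∀ c' ∈ cs, PySem.Chars.isdigit c' = false :=
      fun c' h' => hnd c' (by simp [h'])
    simp only [List.foldl_cons, emit]
    cases hw : wordDigit? (b ++ [c]) with
    | some d =>
      simp only [stepA, hw]
      rw [ih [] (srg ++ [d]) hcs]; simp
    | none =>
      simp only [stepA, hw, hc]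
      exact ih (b ++ [c]) srg hcs

-- a buffer that never matches emits nothing
lemma emit_dead (cs : List Char) : ∀ b,
    (∀ i, wordDigit? (b ++ cs.take i) = none) → emit b cs = [] := by
  induction cs with
  | nil => intro b _; rfl
  | cons c cs ih =>
    intro b h
    have h1 : wordDigit? (b ++ [c]) = none := by simpa using h 1
    simp only [emit, h1]
    refine ih (b ++ [c]) (fun i => ?_)
    have := h (i + 1)
    simpa [List.append_assoc] using this
-- a matching word at the front is consumed in one run of emit
lemma emit_word (cs : List Char) : ∀ (b : List Char) (d : Char) (rest : List Char),
    cs ≠ [] →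
    wordDigit? (b ++ cs) = some d →
    (∀ j, 0 < j → j < cs.length → wordDigit? (b ++ cs.take j) = none) →
    emit b (cs ++ rest) = d :: emit [] rest := by
  induction cs with
  | nil => intro _ _ _ h; exact absurd rfl h
  | cons c cs ih =>
    intro b d rest _ hw hpr
    cases cs with
    | nil =>
      simp only [List.cons_append, List.nil_append, emit]
      simp [show wordDigit? (b ++ [c]) = some d from by simpa using hw]
    | cons c' cs' =>
      have h1 : wordDigit? (b ++ [c]) = none := by
        simpa using hpr 1 (by omega) (by simp)
      simp only [List.cons_append, emit, h1]
      refine ih (b ++ [c]) d rest (by simp) (by simpa [List.append_assoc] using hw)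
        (fun j hj hjl => ?_)
      have := hpr (j + 1) (by omega) (by simp at hjl ⊢; omega)
      simpa [List.append_assoc] using this

-- emit from an empty buffer is exactly B's greedy conversion
lemma emit_eq_runGo (seg : List Char) : emit [] seg = runGo seg := by
  induction seg using runGo.induct with
  | case1 seg p h ih =>
    have hp : p.1.isPrefixOf seg = true := by simpa using List.find?_some h
    have hm : p ∈ words := List.mem_of_find?_eq_some h
    obtain ⟨rest, hrest⟩ := List.isPrefixOf_iff_prefix.mp hp
    have hdrop : seg.drop p.1.length = rest := by
      rw [← hrest]; exact List.drop_left
    have hne : p.1 ≠ [] := by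
      have := words_min_len p hm
      intro hc; simp [hc] at this
    have hstep : emit [] (p.1 ++ rest) = p.2 :: emit [] rest := by
      refine emit_word p.1 [] p.2 rest hne (by simpa using words_lookup p hm)
        (fun j hj hjl => by simpa using words_proper p hm j hjl hj)
    calc emit [] seg = p.2 :: emit [] rest := by rw [← hrest]; exact hstep
      _ = p.2 :: runGo (seg.drop p.1.length) := by rw [hdrop] at ih ⊢; rw [ih]
      _ = runGo seg := by conv_rhs => rw [runGo, h]
  | case2 seg h =>
    have hnone : ∀ i, wordDigit? (([] : List Char) ++ seg.take i) = none := by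
      intro i
      cases hw : wordDigit? (([] : List Char) ++ seg.take i) with
      | none => rfl
      | some d =>
        exfalso
        have hm := wordDigit?_mem hw
        have := List.find?_eq_none.mp h _ hm
        simp only [List.nil_append] at hm ⊢
        exact this (by simpa using List.isPrefixOf_iff_prefix.mpr (List.take_prefix i seg))
    rw [runGo, h]
    exact emit_dead seg [] hnone

-- the main per-item simulation: A's fold equals B's staged split-and-convert
lemma foldA_splitGo (cs : List Char) : ∀ (seg srg : List Char),
    (∀ c ∈ seg, PySem.Chars.isdigit c = false) →
    (cs.foldl stepA (seg.foldl stepA (srg, []))).1 = srg ++ splitGo cs seg := by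
  induction cs with
  | nil =>
    intro seg srg hseg
    simp only [List.foldl_nil, splitGo]
    rw [foldA_emit seg [] srg hseg, emit_eq_runGo]
  | cons c cs ih =>
    intro seg srg hseg
    by_cases hc : PySem.Chars.isdigit c = true
    · rcases hpair : seg.foldl stepA (srg, []) with ⟨s1, b1⟩
      have hs1 : s1 = srg ++ emit [] seg := by
        have := foldA_emit seg [] srg hseg
        rw [hpair] at this
        exact this
      have hstep : stepA (s1, b1) c = (s1 ++ [c], []) := by
        simp [stepA, wordDigit?_none_of_digit hc, hc]
      have hih := ih [] (s1 ++ [c]) (by simp)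
      simp only [List.foldl_nil] at hih
      rw [List.foldl_cons, hstep, hih, hs1, emit_eq_runGo]
      simp [splitGo, hc]
    · have hc' : PySem.Chars.isdigit c = false := by
        cases h : PySem.Chars.isdigit c
        · rfl
        · exact absurd h hc
      have happ : (c :: cs).foldl stepA (seg.foldl stepA (srg, []))
          = cs.foldl stepA ((seg ++ [c]).foldl stepA (srg, [])) := by
        rw [List.foldl_append]; rfl
      rw [happ, ih (seg ++ [c]) srg
        (by intro x hx; rcases List.mem_append.mp hx with h | h
            · exact hseg x h
            · simp at h; subst h; exact hc')]
      simp [splitGo, hc']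

-- A's outer fold appends the per-item results (the carried buffer is reset to [])
lemma gatherA_go (data : List String) :
    ∀ acc : List String,
      (data.foldl
        (fun (acc : List String × List Char) item =>
          let r := item.toList.foldl stepA ([], acc.2)
          (acc.1 ++ [String.ofList r.1], [])) (acc, [])).1
        = acc ++ data.map convertAlt := by
  induction data with
  | nil => intro acc; simp
  | cons s data ih =>
    intro acc
    simp only [List.foldl_cons, List.map_cons]
    have hitem : (s.toList.foldl stepA ([], ([] : List Char))).1
        = splitGo s.toList [] := by
      have := foldA_splitGo s.toList [] [] (by simp)
      simpa using this
    rw [ih]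
    simp [hitem, convertAlt]

-- ===== VERDICT (by name: the statement is the Claim_ definition above) =====
theorem gather_valid_spec : Claim_equal_gather_valid := by
  intro data _
  unfold Spec_gather_valid gather_valid gather_valid_alt
  simpa using gatherA_go data []
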